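-- pv_equiv track=rewrite | github.com/GeoKM/hardsector_tool | src/hardsector_tool/wang.py | run_length_histogram
-- ===== SOURCE A (Python) =====
-- from collections import Counter
-- from typing import Dict, Iterable, Sequence, Tuple
--
-- def run_length_histogram(bitcells: Iterable[int], limit: int = 16) -> dict[str, int]:
--     hist: Counter[int] = Counter()
--     prev: int | None = None
--     run = 0
--     for bit in bitcells:
--         if bit == prev:
--             run += 1
--         else:
--             if prev is not None:
--                 hist[min(run, limit)] += 1
--             prev = bit
--             run = 1
--     if prev is not None:
--         hist[min(run, limit)] += 1
--     return {str(k): v for k, v in sorted(hist.items())}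
-- ===== SOURCE B (Python) =====
-- def run_length_histogram(bitcells, limit=16):
--     bits = list(bitcells)
--     if not bits:
--         return {}
--     # staged: 1) boundary positions, 2) run lengths as edge differences, 3) sort, 4) group
--     edges = [0] + [i for i, (x, y) in enumerate(zip(bits, bits[1:]), 1) if x != y] + [len(bits)]
--     runs = sorted(min(b - a, limit) for a, b in zip(edges, edges[1:]))
--     hist = {}
--     for r in runs:
--         hist[r] = hist.get(r, 0) + 1
--     return {str(k): v for k, v in hist.items()}
-- ===== Notes on version B (the rewrite author's own statement) =====
-- stated objective: alternative
-- what changed: Replaces A's one-pass prev/run state machine feeding a Counter that is sorted at the end by a staged pipeline: compute the positions where the bit value changes, obtain run lengths as differences of consecutive boundary positions, sort the capped lengths, and build the result dict by inserting them in sorted order so no final sort of the histogram is needed.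
import Mathlib
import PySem

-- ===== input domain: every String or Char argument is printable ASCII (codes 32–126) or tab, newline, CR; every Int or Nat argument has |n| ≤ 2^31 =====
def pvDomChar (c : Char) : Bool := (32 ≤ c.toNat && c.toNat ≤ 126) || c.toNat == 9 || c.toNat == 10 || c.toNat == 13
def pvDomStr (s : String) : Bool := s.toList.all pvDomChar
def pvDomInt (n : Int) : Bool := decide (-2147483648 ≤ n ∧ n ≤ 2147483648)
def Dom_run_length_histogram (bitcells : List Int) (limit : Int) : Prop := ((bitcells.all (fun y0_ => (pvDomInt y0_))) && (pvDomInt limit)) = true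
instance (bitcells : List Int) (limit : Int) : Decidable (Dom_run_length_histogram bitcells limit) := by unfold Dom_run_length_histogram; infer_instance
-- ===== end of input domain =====

-- B replaces A's one-pass prev/run state machine + final sort of the Counter by a staged
-- pipeline: boundary positions, run lengths as edge differences, sort the capped lengths,
-- then group them into the dict in already-sorted order (alternative decomposition, same cost).

-- ===== PORT A =====
-- one loop iteration of A: state is (hist, prev, run)
def rlhStep (limit : Int) (s : PySem.Dict Int Int × Option Int × Int) (bit : Int) :
    PySem.Dict Int Int × Option Int × Int :=
  if some bit == s.2.1 then (s.1, s.2.1, s.2.2 + 1)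
  else ((if s.2.1.isSome then s.1.modify (min s.2.2 limit) 0 (· + 1) else s.1), some bit, 1)

-- A's trailing 'if prev is not None: hist[min(run, limit)] += 1'
def rlhFlush (limit : Int) (s : PySem.Dict Int Int × Option Int × Int) : PySem.Dict Int Int :=
  if s.2.1.isSome then s.1.modify (min s.2.2 limit) 0 (· + 1) else s.1

def run_length_histogram (bitcells : List Int) (limit : Int) : List (String × Int) :=
  -- hist = the Counter left by the loop plus the trailing flush
  (PySem.List.sorted2 (rlhFlush limit (bitcells.foldl (rlhStep limit)
      (PySem.Dict.empty, none, 0))).items (fun p => p.1) (fun p => p.2) false).map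
    (fun p => (PySem.Int.toStr p.1, p.2))

-- ===== PORT B =====
-- edges = [0] + [i for i, (x, y) in enumerate(zip(bits, bits[1:]), 1) if x != y] + [len(bits)]
def altEdges (bits : List Int) : List Int :=
  0 :: (((PySem.List.enumerate (bits.zip bits.tail) 1).filter
           (fun p => !(p.2.1 == p.2.2))).map (fun p => p.1) ++ [(bits.length : Int)])

-- runs = sorted(min(b - a, limit) for a, b in zip(edges, edges[1:]))
def altRuns (bits : List Int) (limit : Int) : List Int :=
  PySem.List.sorted (((altEdges bits).zip (altEdges bits).tail).map
    (fun p => min (p.2 - p.1) limit)) (fun x => x) false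

def run_length_histogram_alt (bitcells : List Int) (limit : Int) : List (String × Int) :=
  if bitcells = [] then []
  else
    -- hist = {}; for r in runs: hist[r] = hist.get(r, 0) + 1; {str(k): v for k, v in hist.items()}
    (((altRuns bitcells limit).foldl (fun d r => d.insert r (d.getD r 0 + 1))
        PySem.Dict.empty).items).map (fun p => (PySem.Int.toStr p.1, p.2))

-- ===== PRECONDITION & SPEC =====
def Spec_run_length_histogram (bitcells : List Int) (limit : Int) (out : List (String × Int)) : Prop := out = run_length_histogram_alt bitcells limit
instance (bitcells : List Int) (limit : Int) (out : List (String × Int)) : Decidable (Spec_run_length_histogram bitcells limit out) := by unfold Spec_run_length_histogram; infer_instance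

-- ===== CLAIM (what is proved, stated in full; the proofs are below) =====
def Claim_equal_run_length_histogram : Prop := ∀ (bitcells : List Int) (limit : Int), Dom_run_length_histogram bitcells limit → Spec_run_length_histogram bitcells limit (run_length_histogram bitcells limit)

-- ===== LEMMAS AND PROOFS =====

-- proof-side view of the bit stream: its maximal runs of equal bits, as (key, group) pairs
def pyGroupbyAux (k : Int) (acc : List Int) : List Int → List (Int × List Int)
  | [] => [(k, acc.reverse)]
  | b :: t => if b == k then pyGroupbyAux k (b :: acc) t
              else (k, acc.reverse) :: pyGroupbyAux b [b] t

-- proof-side names for B's first two stages (definitionally the pieces of altEdges/altRuns)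
def chg (l : List Int) (s : Int) : List Int :=
  ((PySem.List.enumerate (l.zip l.tail) s).filter (fun p => !(p.2.1 == p.2.2))).map (fun p => p.1)

def capdiffs (e : List Int) (limit : Int) : List Int :=
  (e.zip e.tail).map (fun p => min (p.2 - p.1) limit)

-- the common canonical form both programs are reduced to
def canon (xs : List Int) : List (String × Int) :=
  (PySem.List.sorted (PySem.Set.ofList xs) (fun x => x) false).map
    (fun k => (PySem.Int.toStr k, (xs.count k : Int)))

-- A-side invariant: flushing A's loop run from state (hist, some p, |acc|) over l equals
-- counting the capped lengths of the remaining groups (current partial group acc included)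
theorem rlh_key (limit : Int) (l : List Int) :
    ∀ (hist : PySem.Dict Int Int) (p : Int) (acc : List Int),
    rlhFlush limit (l.foldl (rlhStep limit) (hist, some p, (acc.length : Int)))
      = ((pyGroupbyAux p acc l).map (fun g => min (g.2.length : Int) limit)).foldl
          (fun d x => d.modify x 0 (· + 1)) hist := by
  induction l with
  | nil =>
    intro hist p acc
    simp [rlhFlush, pyGroupbyAux]
  | cons b t ih =>
    intro hist p acc
    by_cases h : b = p
    · subst h
      have h1 : rlhStep limit (hist, some b, (acc.length : Int)) b
          = (hist, some b, ((b :: acc).length : Int)) := by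
        simp [rlhStep]
      rw [List.foldl_cons, h1, ih hist b (b :: acc)]
      simp [pyGroupbyAux]
    · have h1 : rlhStep limit (hist, some p, (acc.length : Int)) b
          = (hist.modify (min (acc.length : Int) limit) 0 (· + 1), some b, ((([b] : List Int)).length : Int)) := by
        simp [rlhStep, h]
      rw [List.foldl_cons, h1, ih _ b [b]]
      simp [pyGroupbyAux, h]

-- structural equation for the boundary-position comprehension
theorem chg_cons (a b : Int) (t : List Int) (s : Int) :
    chg (a :: b :: t) s = (if a == b then [] else [s]) ++ chg (b :: t) (s + 1) := by
  by_cases h : a = b <;> simp [chg, PySem.List.enumerate_cons, h]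

theorem capdiffs_cons₂ (x y : Int) (r : List Int) (limit : Int) :
    capdiffs (x :: y :: r) limit = min (y - x) limit :: capdiffs (y :: r) limit := by
  simp [capdiffs]

-- B's stage 2 computes exactly the capped group lengths of the bit stream, in order
theorem chg_groups (limit : Int) (t : List Int) : ∀ (p : Int) (acc : List Int) (s : Int),
    capdiffs ((s - (acc.length : Int)) :: (chg (p :: t) s ++ [s + (t.length : Int)])) limit
      = (pyGroupbyAux p acc t).map (fun g => min ((g.2.length : Int)) limit) := by
  induction t with
  | nil =>
    intro p acc s
    have hchg : chg [p] s = [] := by simp [chg]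
    simp [pyGroupbyAux, hchg, capdiffs]
  | cons b t' ih =>
    intro p acc s
    rw [chg_cons]
    by_cases h : p = b
    · subst h
      have hif : (if (p == p) then ([] : List Int) else [s]) = [] := by simp
      rw [hif, List.nil_append]
      have e1 : s - ((acc.length : Int)) = (s+1) - (((p :: acc).length : Int)) := by
        simp
      have e2 : s + (((p :: t').length : Int)) = (s+1) + ((t'.length : Int)) := by
        simp ; omega
      rw [e1, e2, ih p (p :: acc) (s+1)]
      simp [pyGroupbyAux]
    · have hif : (if (p == b) then ([] : List Int) else [s]) = [s] := by
        simp [h]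
      rw [hif]
      have e2 : s + (((b :: t').length : Int)) = (s+1) + ((t'.length : Int)) := by
        simp ; omega
      have e3 : (([s] ++ chg (b :: t') (s+1)) ++ [s + (((b :: t').length : Int))])
          = s :: (chg (b :: t') (s+1) ++ [(s+1) + ((t'.length : Int))]) := by
        simp ; omega
      rw [e3, capdiffs_cons₂]
      have ih' := ih b [b] (s+1)
      rw [show ((s+1) - ((([b] : List Int).length : Int))) = s from by simp] at ih'
      rw [ih']
      have hbp : (b == p) = false := beq_eq_false_iff_ne.mpr (Ne.symm h)
      have egr : pyGroupbyAux p acc (b :: t') = (p, acc.reverse) :: pyGroupbyAux b [b] t' := by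
        simp [pyGroupbyAux, hbp]
      rw [egr, List.map_cons]
      congr 1
      simp

-- inserting a mapped pair into a mapped list under the tuple comparator is inserting the key
theorem insertBy_lex_map (c : Int → Int) (k : Int) (accS : List Int) (hk : k ∉ accS) :
    PySem.List.insertBy
        (fun q b => decide (q.1 < b.1) || (!decide (b.1 < q.1) && decide (q.2 < b.2)))
        (k, c k) (accS.map (fun x => (x, c x)))
      = (PySem.List.insertBy (fun a b => decide (a < b)) k accS).map (fun x => (x, c x)) := by
  induction accS with
  | nil => simp [PySem.List.insertBy]
  | cons y ys ih =>
    have hky : k ≠ y := by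
      intro hh; exact hk (hh ▸ List.mem_cons_self)
    have hk' : k ∉ ys := fun hh => hk (List.mem_cons_of_mem y hh)
    have hcmp : (decide ((k : Int) < y) || (!decide (y < k) && decide (c k < c y))) = decide (k < y) := by
      rcases lt_trichotomy k y with hlt | heq | hgt
      · simp [hlt]
      · exact absurd heq hky
      · have h1 : ¬ k < y := not_lt.mpr hgt.le
        simp [h1, hgt]
    simp only [List.map_cons, PySem.List.insertBy]
    rw [hcmp]
    by_cases hlt : k < y
    · simp [hlt]
    · simp [hlt, ih hk']

-- folding tuple-key insertions over mapped keys is mapping the key-only insertion sort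
theorem foldl_insertBy_lex_map (c : Int → Int) (L : List Int) :
    ∀ (accS : List Int), (∀ k ∈ L, k ∉ accS) → L.Nodup →
    L.foldl (fun a k => PySem.List.insertBy
        (fun q b => decide (q.1 < b.1) || (!decide (b.1 < q.1) && decide (q.2 < b.2)))
        (k, c k) a) (accS.map (fun x => (x, c x)))
      = (L.foldl (fun a k => PySem.List.insertBy (fun a b => decide (a < b)) k a) accS).map
          (fun x => (x, c x)) := by
  induction L with
  | nil => intro accS _ _; simp
  | cons k L' ih =>
    intro accS hdisj hnd
    rw [List.foldl_cons, List.foldl_cons,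
        insertBy_lex_map c k accS (hdisj k List.mem_cons_self)]
    refine ih _ ?_ (List.Nodup.of_cons hnd)
    intro k' hk' hmem
    rcases (PySem.List.mem_insertBy _ _ _ _).mp hmem with heq | hmem'
    · exact (List.nodup_cons.mp hnd).1 (heq ▸ hk')
    · exact hdisj k' (List.mem_cons_of_mem k hk') hmem'

-- sorting pairs with distinct first components by the tuple key sorts the keys
theorem sorted2_map_fst (S : List Int) (hS : S.Nodup) (c : Int → Int) :
    PySem.List.sorted2 (S.map (fun k => (k, c k))) (fun p => p.1) (fun p => p.2) false
      = (PySem.List.sorted S (fun x => x) false).map (fun k => (k, c k)) := by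
  rw [PySem.List.sorted_eq_foldl_insertBy]
  have hL : PySem.List.sorted2 (S.map (fun k => (k, c k))) (fun p => p.1) (fun p => p.2) false
      = (S.map (fun k => (k, c k))).foldl
          (fun a x => PySem.List.insertBy
            (fun q b => decide (q.1 < b.1) || (!decide (b.1 < q.1) && decide (q.2 < b.2))) x a)
          [] := rfl
  rw [hL, List.foldl_map]
  have := foldl_insertBy_lex_map c S [] (by simp) hS
  simpa using this

-- set(xs) is a sublist of xs (first occurrences, in order)
theorem foldl_add_sublist (xs : List Int) :
    ∀ (s ys : List Int), s.Sublist ys → (xs.foldl PySem.Set.add s).Sublist (ys ++ xs) := by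
  induction xs with
  | nil => intro s ys h; simpa using h
  | cons x t ih =>
    intro s ys h
    rw [List.foldl_cons]
    have hs : (PySem.Set.add s x).Sublist (ys ++ [x]) := by
      unfold PySem.Set.add
      split_ifs
      · exact h.trans (List.sublist_append_left ys [x])
      · exact List.Sublist.append h (List.Sublist.refl [x])
    have := ih (PySem.Set.add s x) (ys ++ [x]) hs
    simpa [List.append_assoc] using this
theorem set_ofList_sublist (xs : List Int) : (PySem.Set.ofList xs).Sublist xs := by
  rw [PySem.Set.ofList_eq_foldl]
  simpa using foldl_add_sublist xs [] [] (List.Sublist.refl [])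

-- set(xs) of a sorted list is the sorted set
theorem ofList_sorted (xs : List Int) :
    PySem.Set.ofList (PySem.List.sorted xs (fun x => x) false)
      = PySem.List.sorted (PySem.Set.ofList xs) (fun x => x) false := by
  have hperm : (PySem.Set.ofList (PySem.List.sorted xs (fun x => x) false)).Perm
      (PySem.Set.ofList xs) := by
    refine (List.perm_ext_iff_of_nodup (PySem.Set.nodup_ofList _) (PySem.Set.nodup_ofList _)).mpr ?_
    intro a
    simp [PySem.Set.mem_ofList, PySem.List.mem_sorted]
  have hpair : (PySem.Set.ofList (PySem.List.sorted xs (fun x => x) false)).Pairwise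
      (fun a b => (fun x => x) a < (fun x => x) b) := by
    have h1 := set_ofList_sublist (PySem.List.sorted xs (fun x => x) false)
    have h2 := PySem.List.sorted_pairwise xs (fun x => x)
    have h3 : (PySem.Set.ofList (PySem.List.sorted xs (fun x => x) false)).Pairwise (· ≤ ·) :=
      List.Pairwise.sublist h1 h2
    have h4 : (PySem.Set.ofList (PySem.List.sorted xs (fun x => x) false)).Pairwise (· ≠ ·) :=
      PySem.Set.nodup_ofList _
    exact (h3.and h4).imp (fun hab => lt_of_le_of_ne hab.1 hab.2)
  symm
  exact PySem.List.sorted_eq_of_perm_of_pairwise_lt _ _ _ hperm hpair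

theorem A_eq_canon (b : Int) (t : List Int) (limit : Int) :
    run_length_histogram (b :: t) limit
      = canon ((pyGroupbyAux b [b] t).map (fun g => min ((g.2.length : Int)) limit)) := by
  unfold run_length_histogram
  have h1 : rlhStep limit (PySem.Dict.empty, none, 0) b
      = (PySem.Dict.empty, some b, ((([b] : List Int)).length : Int)) := by
    simp [rlhStep]
  rw [List.foldl_cons, h1, rlh_key limit t PySem.Dict.empty b [b],
      ← PySem.Dict.counter_eq_foldl, PySem.Dict.items_counter,
      sorted2_map_fst _ (PySem.Set.nodup_ofList _)]
  simp [canon, List.map_map, Function.comp]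

theorem B_eq_canon (b : Int) (t : List Int) (limit : Int) :
    run_length_histogram_alt (b :: t) limit
      = canon ((pyGroupbyAux b [b] t).map (fun g => min ((g.2.length : Int)) limit)) := by
  unfold run_length_histogram_alt
  rw [if_neg (List.cons_ne_nil b t)]
  have hedges : altEdges (b :: t)
      = ((1 : Int) - (([b] : List Int).length : Int)) :: (chg (b :: t) 1 ++ [(1 : Int) + (t.length : Int)]) := by
    unfold altEdges chg
    simp ; omega
  have hruns : altRuns (b :: t) limit
      = PySem.List.sorted ((pyGroupbyAux b [b] t).map (fun g => min ((g.2.length : Int)) limit))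
          (fun x => x) false := by
    have hd : altRuns (b :: t) limit
        = PySem.List.sorted (capdiffs (altEdges (b :: t)) limit) (fun x => x) false := rfl
    rw [hd, hedges, chg_groups]
  rw [hruns, PySem.Dict.foldl_insert_getD_add_one_eq_counter, PySem.Dict.items_counter,
      ofList_sorted]
  unfold canon
  rw [List.map_map]
  refine List.map_congr_left ?_
  intro k hk
  simp only [Function.comp]
  have hc := (PySem.List.sorted_perm
      ((pyGroupbyAux b [b] t).map (fun g => min ((g.2.length : Int)) limit)) (fun x => x) false).count_eq k
  rw [hc]

-- ===== VERDICT (by name: the statement is the Claim_ definition above) =====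
theorem run_length_histogram_spec : Claim_equal_run_length_histogram := by
  intro bitcells limit _
  show run_length_histogram bitcells limit = run_length_histogram_alt bitcells limit
  cases bitcells with
  | nil => rfl
  | cons b t => rw [A_eq_canon, B_eq_canon]
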